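-- pv_equiv track=rewrite | github.com/qeedquan/challenges | project_euler/62-cubic-permutations.py | digitsort
-- ===== SOURCE A (Python) =====
-- def digitsort(n):
--     d = 10*[0]
--     while n > 0:
--         d[n % 10] += 1
--         n //= 10
--
--     r = 0
--     for v in range(9, -1, -1):
--         r = (10 ** d[v] * (v + 9 * r) - v) // 9;
--     return r
-- ===== SOURCE B (Python) =====
-- def digitsort(n):
--     ds = []
--     while n > 0:
--         ds.append(n % 10)
--         n //= 10
--     r = 0
--     for d in reversed(sorted(ds)):
--         r = 10 * r + d
--     return r
-- ===== Notes on version B (the rewrite author's own statement) =====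
-- stated objective: simpler
-- what changed: Replaces A's digit-frequency bucket array plus the fixed positional reconstruction formula over all possible digit values with collecting the digits into a list, sorting it, and rebuilding the number with a plain Horner loop over the digits in descending order.
import Mathlib
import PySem

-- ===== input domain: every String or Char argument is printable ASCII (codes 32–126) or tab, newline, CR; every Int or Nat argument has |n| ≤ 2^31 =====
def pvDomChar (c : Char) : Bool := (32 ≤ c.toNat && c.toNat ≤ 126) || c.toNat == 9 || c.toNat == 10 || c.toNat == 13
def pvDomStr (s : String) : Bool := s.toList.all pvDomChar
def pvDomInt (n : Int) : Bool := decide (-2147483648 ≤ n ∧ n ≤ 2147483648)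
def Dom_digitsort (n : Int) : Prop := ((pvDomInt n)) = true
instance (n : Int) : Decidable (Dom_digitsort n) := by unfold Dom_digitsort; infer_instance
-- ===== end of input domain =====

-- B replaces A's digit-frequency array plus positional reconstruction formula by
-- collecting the digits, sorting them, and a Horner fold in descending order (simpler, same cost).

-- termination helper, cited by both ports' decreasing_by
theorem pvFloordiv10_toNat_lt (n : Int) (h : 0 < n) :
    (PySem.Int.floordiv n 10).toNat < n.toNat := by
  rw [PySem.Int.floordiv_eq_ediv_of_pos (by norm_num)]
  omega

-- ===== PORT A =====
-- while n > 0: d[n % 10] += 1; n //= 10   (the index n % 10 is a valid in-range bucket index, so List.modify is exact)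
def pyCountLoop (n : Int) (d : List Int) : List Int :=
  if h : 0 < n then
    pyCountLoop (PySem.Int.floordiv n 10) (d.modify (PySem.Int.mod n 10).toNat (· + 1))
  else d
termination_by n.toNat
decreasing_by exact pvFloordiv10_toNat_lt n h

-- the exponent d[v] is a digit count, hence nonnegative: `.toNat` is exact for Python's 10 ** d[v]
def digitsort (n : Int) : Int :=
  let d := pyCountLoop n (List.replicate 10 0)
  (PySem.List.pyRange 9 (-1) (-1)).foldl
    (fun r v => PySem.Int.floordiv (10 ^ (PySem.List.pyGetD d v 0).toNat * (v + 9 * r) - v) 9) 0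

-- ===== PORT B =====
-- ds = []; while n > 0: ds.append(n % 10); n //= 10
def altDigits (n : Int) : List Int :=
  if h : 0 < n then PySem.Int.mod n 10 :: altDigits (PySem.Int.floordiv n 10) else []
termination_by n.toNat
decreasing_by exact pvFloordiv10_toNat_lt n h

-- for d in reversed(sorted(ds)): r = 10 * r + d
def digitsort_alt (n : Int) : Int :=
  ((PySem.List.sorted (altDigits n) (fun x => x)).reverse).foldl (fun r d => 10 * r + d) 0

-- ===== PRECONDITION & SPEC =====
def Spec_digitsort (n : Int) (out : Int) : Prop := out = digitsort_alt n
instance (n : Int) (out : Int) : Decidable (Spec_digitsort n out) := by unfold Spec_digitsort; infer_instance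

-- ===== CLAIM (what is proved, stated in full; the proofs are below) =====
def Claim_equal_digitsort : Prop := ∀ (n : Int), Dom_digitsort n → Spec_digitsort n (digitsort n)

-- ===== LEMMAS AND PROOFS =====

-- every collected digit is a valid decimal digit
theorem mem_altDigits (n : Int) : ∀ x ∈ altDigits n, 0 ≤ x ∧ x < 10 := by
  fun_induction altDigits n with
  | case1 n h ih =>
    intro x hx
    rcases List.mem_cons.mp hx with rfl | hx
    · exact ⟨PySem.Int.mod_nonneg _ (by norm_num), PySem.Int.mod_lt _ (by norm_num)⟩
    · exact ih x hx
  | case2 n h => simp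

-- A's counting loop is the fold of B's digit list over List.modify
theorem countLoop_eq (n : Int) :
    ∀ d, pyCountLoop n d = (altDigits n).foldl (fun acc x => acc.modify x.toNat (· + 1)) d := by
  fun_induction altDigits n with
  | case1 n h ih =>
    intro d
    rw [pyCountLoop, dif_pos h, ih, List.foldl_cons]
  | case2 n h =>
    intro d
    rw [pyCountLoop, dif_neg h, List.foldl_nil]

-- reading a bucket after the modify-fold: initial value plus the count of that digit
theorem getD_foldl_modify (xs : List Int) (hxs : ∀ x ∈ xs, 0 ≤ x ∧ x < 10) :
    ∀ (d : List Int), d.length = 10 → ∀ v : Int, 0 ≤ v → v < 10 →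
      (xs.foldl (fun acc x => acc.modify x.toNat (· + 1)) d).getD v.toNat 0
        = d.getD v.toNat 0 + xs.count v := by
  induction xs with
  | nil => intro d _ v _ _; simp
  | cons x xs ih =>
    intro d hd v hv0 hv10
    obtain ⟨hx0, hx10⟩ := hxs x (by simp)
    have hxs' : ∀ y ∈ xs, 0 ≤ y ∧ y < 10 := fun y hy => hxs y (by simp [hy])
    rw [List.foldl_cons, ih hxs' _ (by simp [hd]) v hv0 hv10]
    have hvlen : v.toNat < d.length := by omega
    have hxlen : x.toNat < d.length := by omega
    rw [List.getD_eq_getElem _ _ (by simpa using hvlen),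
        List.getD_eq_getElem _ _ hvlen, List.getElem_modify]
    rw [List.count_cons]
    by_cases hxv : x = v
    · rw [if_pos (by omega), if_pos (by simp [hxv])]; push_cast; ring
    · rw [if_neg (by omega), if_neg (by simp [hxv])]; push_cast; ring

theorem getD_replicate_zero (i : Nat) : (List.replicate 10 (0 : Int)).getD i 0 = 0 := by
  rcases Nat.lt_or_ge i 10 with h | h
  · rw [List.getD_eq_getElem _ _ (by simpa using h)]; interval_cases i <;> rfl
  · rw [List.getD_eq_default _ _ (by simpa using h)]

-- what A's loop leaves in bucket v: the number of occurrences of digit v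
theorem pyGetD_count (n : Int) (v : Int) (h0 : 0 ≤ v) (h10 : v < 10) :
    PySem.List.pyGetD (pyCountLoop n (List.replicate 10 0)) v 0
      = ((altDigits n).count v : Int) := by
  rw [countLoop_eq, PySem.List.pyGetD_of_nonneg _ _ h0,
      getD_foldl_modify _ (mem_altDigits n) _ (by simp) v h0 h10,
      getD_replicate_zero, zero_add]

def repunit : Nat → Int
  | 0 => 0
  | c + 1 => 10 * repunit c + 1

theorem nine_repunit (c : Nat) : 9 * repunit c = 10 ^ c - 1 := by
  induction c with
  | zero => simp [repunit]
  | succ c ih => rw [repunit, pow_succ]; linarith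

-- Horner fold over a block of c equal digits v
theorem hfold_replicate (c : Nat) (v r : Int) :
    (List.replicate c v).foldl (fun r d => 10 * r + d) r = r * 10 ^ c + v * repunit c := by
  induction c generalizing r with
  | zero => simp [repunit]
  | succ c ih =>
    rw [List.replicate_succ, List.foldl_cons, ih, repunit, pow_succ]
    have h9 : (10 : Int) ^ c = 9 * repunit c + 1 := by linarith [nine_repunit c]
    rw [h9]; ring

-- A's per-digit formula appends c copies of digit v
theorem astep_eq (c : Nat) (v r : Int) :
    PySem.Int.floordiv (10 ^ c * (v + 9 * r) - v) 9 = r * 10 ^ c + v * repunit c := by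
  have h : 10 ^ c * (v + 9 * r) - v = 9 * (r * 10 ^ c + v * repunit c) := by
    have h9 : (10 : Int) ^ c = 9 * repunit c + 1 := by linarith [nine_repunit c]
    rw [h9]; ring
  rw [h, PySem.Int.floordiv_eq_ediv_of_pos (by norm_num),
      Int.mul_ediv_cancel_left _ (by norm_num)]

-- A's whole fold is the Horner fold over the concatenated blocks
theorem afold_eq_hfold (vs : List Int) (c : Int → Nat) : ∀ r : Int,
    vs.foldl (fun r v => PySem.Int.floordiv (10 ^ (c v) * (v + 9 * r) - v) 9) r
      = (vs.flatMap fun v => List.replicate (c v) v).foldl (fun r d => 10 * r + d) r := by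
  induction vs with
  | nil => intro r; simp
  | cons x xs ih =>
    intro r
    rw [List.foldl_cons, List.flatMap_cons, List.foldl_append, ih, astep_eq,
        hfold_replicate]

theorem pairwise_flatMap_replicate (vs : List Int) (k : Int → Nat)
    (h : vs.Pairwise (· < ·)) :
    (vs.flatMap fun v => List.replicate (k v) v).Pairwise (· ≤ ·) := by
  induction vs with
  | nil => simp
  | cons x xs ih =>
    rw [List.pairwise_cons] at h
    rw [List.flatMap_cons, List.pairwise_append]
    refine ⟨?_, ih h.2, ?_⟩
    · rw [List.pairwise_replicate]; right; exact le_refl x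
    · intro a ha b hb
      obtain ⟨v, hv, hb⟩ := List.mem_flatMap.mp hb
      rw [List.eq_of_mem_replicate ha, List.eq_of_mem_replicate hb]
      exact le_of_lt (h.1 v hv)

theorem perm_blocks (L : List Int) (hL : ∀ x ∈ L, 0 ≤ x ∧ x < 10) :
    (([0, 1, 2, 3, 4, 5, 6, 7, 8, 9] : List Int).flatMap
        fun v => List.replicate (L.count v) v).Perm L := by
  rw [List.perm_iff_count]
  intro a
  by_cases ha : 0 ≤ a ∧ a < 10
  · obtain ⟨ha0, ha10⟩ := ha
    interval_cases a <;>
      · simp only [List.flatMap, List.map_cons, List.map_nil, List.flatten_cons,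
          List.flatten_nil, List.count_append, List.count_replicate, List.count_nil,
          beq_iff_eq]
        norm_num
  · have hmem : a ∉ L := fun hmemL => ha (hL a hmemL)
    rw [List.count_eq_zero.mpr hmem]
    simp only [List.flatMap, List.map_cons, List.map_nil, List.flatten_cons,
      List.flatten_nil, List.count_append, List.count_replicate, List.count_nil, beq_iff_eq]
    rw [if_neg (by omega : ¬((0 : Int) = a)),
        if_neg (by omega : ¬((1 : Int) = a)),
        if_neg (by omega : ¬((2 : Int) = a)),
        if_neg (by omega : ¬((3 : Int) = a)),
        if_neg (by omega : ¬((4 : Int) = a)),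
        if_neg (by omega : ¬((5 : Int) = a)),
        if_neg (by omega : ¬((6 : Int) = a)),
        if_neg (by omega : ¬((7 : Int) = a)),
        if_neg (by omega : ¬((8 : Int) = a)),
        if_neg (by omega : ¬((9 : Int) = a))]

-- reversing the ascending sort yields the descending blocks of equal digits
theorem sorted_reverse_eq (L : List Int) (hL : ∀ x ∈ L, 0 ≤ x ∧ x < 10) :
    (PySem.List.sorted L (fun x => x)).reverse
      = ([9, 8, 7, 6, 5, 4, 3, 2, 1, 0] : List Int).flatMap
          fun v => List.replicate (L.count v) v := by
  rw [PySem.List.sorted_id_eq_of_perm_of_pairwise L _ (perm_blocks L hL)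
      (pairwise_flatMap_replicate _ _ (by decide))]
  simp [List.flatMap, List.reverse_append]

-- ===== VERDICT (by name: the statement is the Claim_ definition above) =====
theorem digitsort_spec : Claim_equal_digitsort := by
  intro n _
  unfold Spec_digitsort
  show (PySem.List.pyRange 9 (-1) (-1)).foldl
      (fun r v => PySem.Int.floordiv
        (10 ^ (PySem.List.pyGetD (pyCountLoop n (List.replicate 10 0)) v 0).toNat
          * (v + 9 * r) - v) 9) 0 = digitsort_alt n
  have hrange : PySem.List.pyRange 9 (-1) (-1) = [9, 8, 7, 6, 5, 4, 3, 2, 1, 0] := by decide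
  rw [hrange, afold_eq_hfold _ (fun v =>
      (PySem.List.pyGetD (pyCountLoop n (List.replicate 10 0)) v 0).toNat)]
  unfold digitsort_alt
  rw [sorted_reverse_eq _ (mem_altDigits n)]
  congr 1
  simp only [List.flatMap, List.map, List.flatten]
  rw [pyGetD_count n 9 (by norm_num) (by norm_num),
      pyGetD_count n 8 (by norm_num) (by norm_num),
      pyGetD_count n 7 (by norm_num) (by norm_num),
      pyGetD_count n 6 (by norm_num) (by norm_num),
      pyGetD_count n 5 (by norm_num) (by norm_num),
      pyGetD_count n 4 (by norm_num) (by norm_num),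
      pyGetD_count n 3 (by norm_num) (by norm_num),
      pyGetD_count n 2 (by norm_num) (by norm_num),
      pyGetD_count n 1 (by norm_num) (by norm_num),
      pyGetD_count n 0 (by norm_num) (by norm_num)]
  simp
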